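-- pv_equiv track=rewrite | github.com/tranhaduy9824/detect_transaction | create_model.py | is_small_transactions_consecutive
-- ===== SOURCE A (Python) =====
-- def is_small_transactions_consecutive(rolling_history, customer_id, threshold=500, count=5):
--     history = [amt for amt, _ in rolling_history.get(customer_id, [])]
--     if len(history) < count:
--         return False, ""
--
--     # Kiểm tra 5 giao dịch liên tiếp dưới ngưỡng
--     for i in range(len(history) - count + 1):
--         if all(amount < threshold for amount in history[i:i+count]):
--             return True, f"5 giao dịch liên tiếp số tiền nhỏ hơn {threshold}."
--     return False, ""
-- ===== SOURCE B (Python) =====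
-- def is_small_transactions_consecutive(rolling_history, customer_id, threshold=500, count=5):
--     # One pass: track the longest streak of consecutive amounts below the threshold.
--     best = run = 0
--     for amt, _ in rolling_history.get(customer_id, []):
--         run = run + 1 if amt < threshold else 0
--         best = max(best, run)
--     if best >= count:
--         return True, f"5 giao dịch liên tiếp số tiền nhỏ hơn {threshold}."
--     return False, ""
-- ===== Notes on version B (the rewrite author's own statement) =====
-- stated objective: alternative
-- what changed: Replaced A's scan of every length-count window (re-checking each window with all()) by a single pass that maintains the longest streak of consecutive below-threshold amounts and compares it to count once at the end.
import Mathlib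
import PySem

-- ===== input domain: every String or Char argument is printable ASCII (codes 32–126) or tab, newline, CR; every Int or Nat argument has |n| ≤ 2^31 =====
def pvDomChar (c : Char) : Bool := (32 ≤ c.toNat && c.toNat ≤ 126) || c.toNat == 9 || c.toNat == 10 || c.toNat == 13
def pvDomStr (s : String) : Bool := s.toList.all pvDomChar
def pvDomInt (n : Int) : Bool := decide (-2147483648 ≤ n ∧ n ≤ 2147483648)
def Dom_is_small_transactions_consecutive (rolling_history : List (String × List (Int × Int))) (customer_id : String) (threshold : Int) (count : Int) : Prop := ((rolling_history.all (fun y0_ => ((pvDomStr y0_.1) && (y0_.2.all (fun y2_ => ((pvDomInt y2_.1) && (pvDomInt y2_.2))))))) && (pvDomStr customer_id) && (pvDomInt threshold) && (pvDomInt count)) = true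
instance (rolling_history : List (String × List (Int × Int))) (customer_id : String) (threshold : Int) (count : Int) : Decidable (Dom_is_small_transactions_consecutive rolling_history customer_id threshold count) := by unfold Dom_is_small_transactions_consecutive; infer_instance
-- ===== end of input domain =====

-- B replaces A's scan of every length-`count` window by a single pass that
-- tracks the longest streak of consecutive below-threshold amounts.

-- ===== PORT A =====
def is_small_transactions_consecutive (rolling_history : List (String × List (Int × Int))) (customer_id : String) (threshold : Int) (count : Int) : Bool × String :=
  let history := ((PySem.Dict.mk rolling_history).getD customer_id []).map (·.1)
  if (history.length : Int) < count then (false, "")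
  else if (PySem.List.pyRange 0 ((history.length : Int) - count + 1) 1).any
            (fun i => (PySem.List.slice history (some i) (some (i + count))).all
              (fun amount => decide (amount < threshold)))
  then (true, "5 giao dịch liên tiếp số tiền nhỏ hơn " ++ PySem.Int.toStr threshold ++ ".")
  else (false, "")

-- ===== PORT B =====
-- the loop of Source B: fold over the customer's (amt, _) pairs keeping (best, run)
def bestRunLoop (threshold : Int) : List (Int × Int) → Int × Int → Int × Int
  | [], s => s
  | p :: rest, (best, run) =>
    let run' := if p.1 < threshold then run + 1 else 0
    bestRunLoop threshold rest (max best run', run')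

def is_small_transactions_consecutive_alt (rolling_history : List (String × List (Int × Int))) (customer_id : String) (threshold : Int) (count : Int) : Bool × String :=
  let s := bestRunLoop threshold ((PySem.Dict.mk rolling_history).getD customer_id []) (0, 0)
  if count ≤ s.1 then
    (true, "5 giao dịch liên tiếp số tiền nhỏ hơn " ++ PySem.Int.toStr threshold ++ ".")
  else (false, "")

-- ===== PRECONDITION & SPEC =====
def Spec_is_small_transactions_consecutive (rolling_history : List (String × List (Int × Int))) (customer_id : String) (threshold : Int) (count : Int) (out : Bool × String) : Prop := out = is_small_transactions_consecutive_alt rolling_history customer_id threshold count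
instance (rolling_history : List (String × List (Int × Int))) (customer_id : String) (threshold : Int) (count : Int) (out : Bool × String) : Decidable (Spec_is_small_transactions_consecutive rolling_history customer_id threshold count out) := by unfold Spec_is_small_transactions_consecutive; infer_instance

-- ===== CLAIM (what is proved, stated in full; the proofs are below) =====
def Claim_equal_is_small_transactions_consecutive : Prop := ∀ (rolling_history : List (String × List (Int × Int))) (customer_id : String) (threshold : Int) (count : Int), Dom_is_small_transactions_consecutive rolling_history customer_id threshold count → Spec_is_small_transactions_consecutive rolling_history customer_id threshold count (is_small_transactions_consecutive rolling_history customer_id threshold count)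

-- ===== LEMMAS AND PROOFS =====

-- proof-only intermediate: the early-exit running-counter search
def altRun (threshold count : Int) : List Int → Nat → Bool
  | [], _ => false
  | amt :: rest, run =>
    if amt < threshold then
      if count ≤ (run : Int) + 1 then true
      else altRun threshold count rest (run + 1)
    else altRun threshold count rest 0

-- A's window search, rephrased: some window of length c (= count) is entirely below threshold.
lemma anyA_iff (h : List Int) (th cnt : Int) (c : Nat) (hcc : (c : Int) = cnt) (hlen : c ≤ h.length) :
    ((PySem.List.pyRange 0 ((h.length : Int) - cnt + 1) 1).any
        (fun i => (PySem.List.slice h (some i) (some (i + cnt))).all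
          (fun amount => decide (amount < th))) = true)
    ↔ ∃ i : Nat, i + c ≤ h.length ∧ ((h.drop i).take c).all (fun a => decide (a < th)) = true := by
  rw [PySem.List.pyRange_one]
  simp only [List.any_map, List.any_eq_true, List.mem_range, Function.comp]
  constructor
  · rintro ⟨k, hk, hall⟩
    refine ⟨k, by omega, ?_⟩
    have : (0 : Int) + (k : Int) = ((k : Int)) := by ring
    rw [this, ← hcc, PySem.List.slice_natCast_add] at hall
    exact hall
  · rintro ⟨i, hi, hall⟩
    refine ⟨i, by omega, ?_⟩
    have : (0 : Int) + (i : Int) = ((i : Int)) := by ring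
    rw [this, ← hcc, PySem.List.slice_natCast_add]
    exact hall

-- Invariant of the running-counter search: it succeeds iff either the current run can be
-- extended by a prefix of the rest to length ≥ count, or the rest contains a full window.
lemma altRun_iff (th : Int) (c : Nat) (hc : 0 < c) :
    ∀ (l : List Int) (r : Nat), r < c →
    (altRun th (c : Int) l r = true ↔
      (∃ k : Nat, k ≤ l.length ∧ (l.take k).all (fun a => decide (a < th)) = true ∧ c ≤ r + k)
      ∨ (∃ i : Nat, i + c ≤ l.length ∧ ((l.drop i).take c).all (fun a => decide (a < th)) = true)) := by
  intro l
  induction l with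
  | nil =>
    intro r hr
    simp only [altRun]
    constructor
    · intro h; exact absurd h (by simp)
    · rintro (⟨k, hk, _, hck⟩ | ⟨i, hi, _⟩)
      · simp at hk; omega
      · simp at hi; omega
  | cons a rest ih =>
    intro r hr
    by_cases ha : a < th
    · by_cases h1 : (c : Int) ≤ (r : Int) + 1
      · simp only [altRun, if_pos ha, if_pos h1]
        constructor
        · intro _
          exact Or.inl ⟨1, by simp, by simp [ha], by omega⟩
        · intro _; trivial
      · have hr1 : r + 1 < c := by omega
        simp only [altRun, if_pos ha, if_neg h1]
        rw [ih (r + 1) hr1]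
        constructor
        · rintro (⟨k, hk, hall, hck⟩ | ⟨i, hi, hall⟩)
          · exact Or.inl ⟨k + 1, by simp; omega, by simpa [ha] using hall, by omega⟩
          · exact Or.inr ⟨i + 1, by simp; omega, by simpa using hall⟩
        · rintro (⟨k, hk, hall, hck⟩ | ⟨i, hi, hall⟩)
          · match k, hall with
            | 0, _ => omega
            | k' + 1, hall =>
              simp only [List.take_succ_cons, List.all_cons, Bool.and_eq_true] at hall
              exact Or.inl ⟨k', by simp at hk; omega, hall.2, by omega⟩
          · match i, hall with
            | 0, hall =>
              -- the window starts at the head: its tail is a prefix of rest of length c-1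
              obtain ⟨c', rfl⟩ : ∃ c', c = c' + 1 := ⟨c - 1, by omega⟩
              simp only [List.drop_zero, List.take_succ_cons, List.all_cons,
                Bool.and_eq_true] at hall
              exact Or.inl ⟨c', by simp at hi; omega, hall.2, by omega⟩
            | i' + 1, hall =>
              exact Or.inr ⟨i', by simp at hi; omega, by simpa using hall⟩
    · simp only [altRun, if_neg ha]
      rw [ih 0 hc]
      constructor
      · rintro (⟨k, hk, hall, hck⟩ | ⟨i, hi, hall⟩)
        · -- a prefix of rest of length k ≥ c is all below: its first c elements are a window at i = 1
          refine Or.inr ⟨1, by simp; omega, ?_⟩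
          simp only [List.drop_succ_cons, List.drop_zero]
          rw [List.all_eq_true] at hall ⊢
          intro x hx
          apply hall
          have : rest.take c = (rest.take k).take c := by
            rw [List.take_take]; congr 1; omega
          rw [this] at hx
          exact List.take_subset _ _ hx
        · exact Or.inr ⟨i + 1, by simp; omega, by simpa using hall⟩
      · rintro (⟨k, hk, hall, hck⟩ | ⟨i, hi, hall⟩)
        · match k, hall with
          | 0, _ => omega
          | k' + 1, hall =>
            simp only [List.take_succ_cons, List.all_cons, Bool.and_eq_true,
              decide_eq_true_eq] at hall
            exact absurd hall.1 ha
        · match i, hall with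
          | 0, hall =>
            obtain ⟨c', rfl⟩ : ∃ c', c = c' + 1 := ⟨c - 1, by omega⟩
            simp only [List.drop_zero, List.take_succ_cons, List.all_cons, Bool.and_eq_true,
              decide_eq_true_eq] at hall
            exact absurd hall.1 ha
          | i' + 1, hall =>
            exact Or.inr ⟨i', by simp at hi; omega, by simpa using hall⟩

-- the two boolean searches agree when 0 < count ≤ len
lemma any_eq_altRun (h : List Int) (th cnt : Int) (hc : 0 < cnt) (hlen : ¬ ((h.length : Int) < cnt)) :
    ((PySem.List.pyRange 0 ((h.length : Int) - cnt + 1) 1).any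
        (fun i => (PySem.List.slice h (some i) (some (i + cnt))).all
          (fun amount => decide (amount < th))))
      = altRun th cnt h 0 := by
  have hcc : ((cnt.toNat : Int)) = cnt := by omega
  have hcpos : 0 < cnt.toNat := by omega
  have hle : cnt.toNat ≤ h.length := by omega
  have h1 := anyA_iff h th cnt cnt.toNat hcc hle
  have h2 := altRun_iff th cnt.toNat hcpos h 0 hcpos
  rw [hcc] at h2
  have key : (∃ k : Nat, k ≤ h.length ∧ (h.take k).all (fun a => decide (a < th)) = true ∧ cnt.toNat ≤ 0 + k) →
      (∃ i : Nat, i + cnt.toNat ≤ h.length ∧ ((h.drop i).take cnt.toNat).all (fun a => decide (a < th)) = true) := by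
    rintro ⟨k, hk, hall, hck⟩
    refine ⟨0, by omega, ?_⟩
    simp only [List.drop_zero]
    rw [List.all_eq_true] at hall ⊢
    intro x hx
    apply hall
    have : h.take cnt.toNat = (h.take k).take cnt.toNat := by
      rw [List.take_take]; congr 1; omega
    rw [this] at hx
    exact List.take_subset _ _ hx
  cases hA : (PySem.List.pyRange 0 ((h.length : Int) - cnt + 1) 1).any
      (fun i => (PySem.List.slice h (some i) (some (i + cnt))).all
        (fun amount => decide (amount < th))) with
  | true =>
    have := h1.mp hA
    exact (h2.mpr (Or.inr this)).symm
  | false =>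
    cases hB : altRun th cnt h 0 with
    | true =>
      rcases h2.mp hB with hl | hr
      · exact absurd (h1.mpr (key hl)) (by simp [hA])
      · exact absurd (h1.mpr hr) (by simp [hA])
    | false => rfl

-- for count ≤ 0 A's window search always finds the empty window at i = len(history)
lemma any_true_of_nonpos (h : List Int) (th cnt : Int) (hc : cnt ≤ 0) :
    ((PySem.List.pyRange 0 ((h.length : Int) - cnt + 1) 1).any
        (fun i => (PySem.List.slice h (some i) (some (i + cnt))).all
          (fun amount => decide (amount < th)))) = true := by
  rw [List.any_eq_true]
  refine ⟨(h.length : Int), ?_, ?_⟩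
  · rw [PySem.List.mem_pyRange_one]; omega
  · have : PySem.List.slice h (some (h.length : Int)) (some ((h.length : Int) + cnt)) = [] := by
      apply List.eq_nil_of_length_eq_zero
      rw [PySem.List.length_slice]
      have h1 : PySem.List.clampIdx h.length ((h.length : Int)) = h.length := by
        rw [PySem.List.clampIdx_natCast]; omega
      have h2 : PySem.List.clampIdx h.length ((h.length : Int) + cnt) ≤ h.length := by
        have := PySem.List.clampIdx_le h.length ((h.length : Int) + cnt)
        omega
      omega
    rw [this]; rfl

-- the best-so-far never decreases along the fold
lemma bestRunLoop_mono (th : Int) : ∀ (l : List (Int × Int)) (b r : Int),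
    b ≤ (bestRunLoop th l (b, r)).1 := by
  intro l
  induction l with
  | nil => intro b r; simp [bestRunLoop]
  | cons p rest ih =>
    intro b r
    simp only [bestRunLoop]
    exact le_trans (le_max_left b _) (ih _ _)

-- the best-so-far is bounded by the old best and the room left in the list
lemma bestRunLoop_bound (th : Int) : ∀ (l : List (Int × Int)) (b r : Int), 0 ≤ r →
    (bestRunLoop th l (b, r)).1 ≤ max b (r + l.length) := by
  intro l
  induction l with
  | nil => intro b r _; simp [bestRunLoop]
  | cons p rest ih =>
    intro b r hr0
    simp only [bestRunLoop, List.length_cons]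
    refine le_trans (ih _ _ (by split_ifs <;> omega)) ?_
    simp only [max_def]
    split_ifs <;> push_cast <;> omega

-- the streak fold reaches count exactly when the early-exit search succeeds
lemma bestRunLoop_eq_altRun (th cnt : Int) (hc : 0 < cnt) :
    ∀ (l : List (Int × Int)) (b r : Int), 0 ≤ r → b < cnt → r < cnt →
    decide (cnt ≤ (bestRunLoop th l (b, r)).1) = altRun th cnt (l.map (·.1)) r.toNat := by
  intro l
  induction l with
  | nil =>
    intro b r _ hb _
    simp only [bestRunLoop, List.map_nil, altRun, decide_eq_false_iff_not]
    omega
  | cons p rest ih =>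
    intro b r hr0 hb hr
    have hrt : ((r.toNat : Int)) = r := by omega
    simp only [bestRunLoop, List.map_cons, altRun, hrt]
    by_cases ha : p.1 < th
    · simp only [if_pos ha]
      by_cases h1 : cnt ≤ r + 1
      · simp only [if_pos h1, decide_eq_true_eq]
        have : r + 1 ≤ (bestRunLoop th rest (max b (r + 1), r + 1)).1 :=
          le_trans (le_max_right b _) (bestRunLoop_mono th rest _ _)
        omega
      · simp only [if_neg h1]
        have hstep := ih (max b (r + 1)) (r + 1) (by omega) (by omega) (by omega)
        rw [hstep]
        congr 1
        omega
    · simp only [if_neg ha]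
      have hstep := ih (max b 0) 0 le_rfl (by omega) hc
      rw [hstep]
      simp

-- ===== VERDICT (by name: the statement is the Claim_ definition above) =====
theorem is_small_transactions_consecutive_spec : Claim_equal_is_small_transactions_consecutive := by
  intro rolling_history customer_id threshold count _
  unfold Spec_is_small_transactions_consecutive
  unfold is_small_transactions_consecutive is_small_transactions_consecutive_alt
  set pairs := (PySem.Dict.mk rolling_history).getD customer_id [] with hp
  set h := pairs.map (·.1) with hh
  have hlen : h.length = pairs.length := by simp [hh]
  by_cases hc : count ≤ 0
  · have hnl : ¬ ((h.length : Int) < count) := by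
      have : (0 : Int) ≤ (h.length : Int) := by positivity
      omega
    have hbest : count ≤ (bestRunLoop threshold pairs (0, 0)).1 :=
      le_trans (by omega : count ≤ (0:Int)) (bestRunLoop_mono threshold pairs 0 0)
    simp only [if_neg hnl, if_pos hbest, any_true_of_nonpos h threshold count hc]
    simp
  · rw [not_le] at hc
    by_cases hlt : (h.length : Int) < count
    · have hble : (bestRunLoop threshold pairs (0, 0)).1 ≤ (pairs.length : Int) := by
        have hbd := bestRunLoop_bound threshold pairs 0 0 le_rfl
        have hmx : max (0 : Int) (0 + (pairs.length : Int)) = (pairs.length : Int) := by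
          rw [zero_add]; exact max_eq_right (by positivity)
        rw [hmx] at hbd; exact hbd
      have hnb : ¬ (count ≤ (bestRunLoop threshold pairs (0, 0)).1) := by omega
      simp only [if_pos hlt, if_neg hnb]
    · have key := bestRunLoop_eq_altRun threshold count hc pairs 0 0 le_rfl (by omega) (by omega)
      simp only [Int.toNat_zero] at key
      rw [← hh] at key
      have hany := any_eq_altRun h threshold count hc hlt
      simp only [if_neg hlt]
      rw [hany, ← key]
      by_cases hbb : count ≤ (bestRunLoop threshold pairs (0, 0)).1
      · simp [hbb]
      · simp [hbb]
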